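-- pv_equiv track=rewrite | github.com/jonas-kell/bachelor-thesis-code | structures/lattice_parameter_resolver.py | swap_neighbor_index_lists
-- ===== SOURCE A (Python) =====
-- def swap_neighbor_index_lists(reorder_list: list, n_list: list):
--     assert type(n_list) is list
--     assert type(reorder_list) is list
--     assert len(n_list) == len(reorder_list)
--
--     n = len(n_list)
--
--     lookup_list = lookup_list_to_reorder_list(reorder_list)
--
--     new_list = [None] * n
--     for i in range(n):
--         list_to_insert = n_list[lookup_list[i]]
--
--         for j in range(len(list_to_insert)):
--             list_to_insert[j] = reorder_list[list_to_insert[j]]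
--
--         new_list[i] = list_to_insert
--
--     return new_list
--
-- def lookup_list_to_reorder_list(reorder_list: list):
--     assert type(reorder_list) is list
--
--     n = len(reorder_list)
--
--     lookup_list = [None] * n
--     for i in range(n):
--         lookup_list[reorder_list[i]] = i
--
--     return lookup_list
-- ===== SOURCE B (Python) =====
-- def swap_neighbor_index_lists(reorder_list: list, n_list: list):
--     assert type(n_list) is list
--     assert type(reorder_list) is list
--     assert len(n_list) == len(reorder_list)
--
--     n = len(n_list)
--
--     new_list = [None] * n
--     for k in range(n):
--         inner = n_list[k]
--
--         for j in range(len(inner)):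
--             inner[j] = reorder_list[inner[j]]
--
--         new_list[reorder_list[k]] = inner
--
--     return new_list
-- ===== Notes on version B (the rewrite author's own statement) =====
-- stated objective: simpler
-- what changed: Replaces A's inverse-permutation helper plus gather (new_list[i] = n_list[lookup[i]]) by a direct scatter (new_list[reorder_list[k]] = n_list[k]) in one pass, dropping the lookup_list_to_reorder_list helper entirely.
import Mathlib
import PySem

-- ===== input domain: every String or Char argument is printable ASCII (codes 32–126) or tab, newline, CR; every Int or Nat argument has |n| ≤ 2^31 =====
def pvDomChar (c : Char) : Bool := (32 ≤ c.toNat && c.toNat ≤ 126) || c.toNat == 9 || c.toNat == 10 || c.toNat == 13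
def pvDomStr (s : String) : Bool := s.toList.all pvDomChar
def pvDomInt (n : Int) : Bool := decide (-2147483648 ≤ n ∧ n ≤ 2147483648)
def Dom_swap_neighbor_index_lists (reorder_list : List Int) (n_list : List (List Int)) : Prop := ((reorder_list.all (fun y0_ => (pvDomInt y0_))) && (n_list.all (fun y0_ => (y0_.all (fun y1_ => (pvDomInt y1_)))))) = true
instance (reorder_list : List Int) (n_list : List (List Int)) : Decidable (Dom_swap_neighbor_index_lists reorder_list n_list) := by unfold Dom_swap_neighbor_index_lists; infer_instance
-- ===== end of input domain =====

-- B replaces A's inverse-permutation helper + gather by a direct one-pass scatter (same asymptotic cost, no helper).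
-- A mutates the inner lists of n_list in place and B performs the same in-place mutation; the theorems below are about the return value.

-- ===== PORT A =====
-- helper lookup_list_to_reorder_list: Python fills a [None]*n list; under Pre_ every cell is
-- overwritten before it is read, so the 0 placeholder below is never read.
def pvLookupBuild (reorder_list : List Int) : List Int :=
  (List.range reorder_list.length).foldl
    (fun lk (i : Nat) => PySem.List.pySetD lk (PySem.List.pyGetD reorder_list (i:Int) 0) (i:Int))
    (List.replicate reorder_list.length 0)

-- the asserts are ported as the if-guard (outside Pre_ nothing is claimed); the in-place index
-- loop over list_to_insert rewrites each element once, ported element-wise as map.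
def swap_neighbor_index_lists (reorder_list : List Int) (n_list : List (List Int)) : List (List Int) :=
  if n_list.length = reorder_list.length then
    (List.range n_list.length).map (fun (i : Nat) =>
      (PySem.List.pyGetD n_list (PySem.List.pyGetD (pvLookupBuild reorder_list) (i:Int) 0) []).map
        (fun v => PySem.List.pyGetD reorder_list v 0))
  else []

-- ===== PORT B =====
def swap_neighbor_index_lists_alt (reorder_list : List Int) (n_list : List (List Int)) : List (List Int) :=
  if n_list.length = reorder_list.length then
    (List.range n_list.length).foldl
      (fun new_list (k : Nat) =>
        PySem.List.pySetD new_list (PySem.List.pyGetD reorder_list (k:Int) 0)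
          ((PySem.List.pyGetD n_list (k:Int) []).map (fun v => PySem.List.pyGetD reorder_list v 0)))
      (List.replicate n_list.length [])
  else []

-- ===== PRECONDITION & SPEC =====
-- pvNorm n v: the cell a Python index v (possibly negative) addresses in a list of length n
def pvNorm (n : Nat) (v : Int) : Nat := if v < 0 then (v + n).toNat else v.toNat

-- Pre_ = exactly the inputs on which the Python A returns: equal lengths, reorder_list a
-- permutation of the n positions (possibly written with negative Python indices), and every
-- inner entry a valid Python index into reorder_list; on all other inputs A raises
-- (AssertionError / IndexError / TypeError via a None lookup).
def Pre_swap_neighbor_index_lists (reorder_list : List Int) (n_list : List (List Int)) : Prop :=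
  n_list.length = reorder_list.length ∧
  (∀ v ∈ reorder_list, -(reorder_list.length:Int) ≤ v ∧ v < (reorder_list.length:Int)) ∧
  (reorder_list.map (fun v => pvNorm reorder_list.length v)).Nodup ∧
  (∀ l ∈ n_list, ∀ v ∈ l, -(reorder_list.length:Int) ≤ v ∧ v < (reorder_list.length:Int))

instance (reorder_list : List Int) (n_list : List (List Int)) : Decidable (Pre_swap_neighbor_index_lists reorder_list n_list) := by
  unfold Pre_swap_neighbor_index_lists; infer_instance

def pvWitness_swap_neighbor_index_lists : List Int × List (List Int) :=
  ([1, 0, 2], [[2, 0], [], [1]])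

def Spec_swap_neighbor_index_lists (reorder_list : List Int) (n_list : List (List Int)) (out : List (List Int)) : Prop := out = swap_neighbor_index_lists_alt reorder_list n_list
instance (reorder_list : List Int) (n_list : List (List Int)) (out : List (List Int)) : Decidable (Spec_swap_neighbor_index_lists reorder_list n_list out) := by unfold Spec_swap_neighbor_index_lists; infer_instance

-- ===== CLAIM (what is proved, stated in full; the proofs are below) =====
def Claim_equal_swap_neighbor_index_lists : Prop := ∀ (reorder_list : List Int) (n_list : List (List Int)), Dom_swap_neighbor_index_lists reorder_list n_list → Pre_swap_neighbor_index_lists reorder_list n_list → Spec_swap_neighbor_index_lists reorder_list n_list (swap_neighbor_index_lists reorder_list n_list)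

-- ===== LEMMAS AND PROOFS =====

-- generic scatter loop: both A's lookup build and B's main loop are instances of this shape
def pvScat {a : Type} (s : List Int) (f : Nat -> a) (init : List a) (m : Nat) : List a :=
  (List.range m).foldl
    (fun acc (j : Nat) => PySem.List.pySetD acc (PySem.List.pyGetD s (j:Int) 0) (f j)) init

theorem pvNorm_lt (n : Nat) (v : Int) (h1 : -(n:Int) <= v) (h2 : v < (n:Int)) : pvNorm n v < n := by
  unfold pvNorm; split <;> omega

theorem pvSetD_norm {a : Type} (xs : List a) (i : Int) (v : a)
    (h1 : -(xs.length:Int) <= i) (h2 : i < (xs.length:Int)) :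
    PySem.List.pySetD xs i v = xs.set (pvNorm xs.length i) v := by
  by_cases h0 : 0 ≤ i
  · rw [PySem.List.pySetD_of_nonneg xs v h0, pvNorm, if_neg (by omega)]
  · unfold PySem.List.pySetD PySem.List.pySet? PySem.List.pyIdx?
    rw [if_neg h0, if_pos h1]
    simp only [Option.map_some, Option.getD_some, pvNorm, if_pos (by omega : i < 0)]
    congr 1
    omega

theorem pvGetD_set_ne {a : Type} (xs : List a) (i j : Nat) (v : a) (d : a) (h : i ≠ j) :
    (xs.set i v).getD j d = xs.getD j d := by
  by_cases hj : j < xs.length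
  · rw [List.getD_eq_getElem _ d (by simpa using hj), List.getD_eq_getElem _ d hj]
    exact List.getElem_set_ne h _
  · rw [List.getD_eq_default _ d (by simpa using hj), List.getD_eq_default _ d (by omega)]

theorem pvScat_succ {a : Type} (s : List Int) (f : Nat -> a) (init : List a) (m : Nat) :
    pvScat s f init (m+1) = PySem.List.pySetD (pvScat s f init m) (PySem.List.pyGetD s (m:Int) 0) (f m) := by
  unfold pvScat
  rw [List.range_succ, List.foldl_append, List.foldl_cons, List.foldl_nil]

theorem pvScat_length {a : Type} (s : List Int) (f : Nat -> a) (init : List a) (m : Nat) :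
    (pvScat s f init m).length = init.length := by
  induction m with
  | zero => rfl
  | succ m ih => rw [pvScat_succ, PySem.List.length_pySetD, ih]

theorem pvNodup_ne (s : List Int) (hnd : (s.map (fun v => pvNorm s.length v)).Nodup)
    (k m : Nat) (hk : k < s.length) (hm : m < s.length) (hne : k ≠ m) :
    pvNorm s.length (s[k]) ≠ pvNorm s.length (s[m]) := by
  intro e
  have h := List.pairwise_iff_getElem.mp hnd
  rcases Nat.lt_or_ge k m with hlt | hge
  · exact h k m (by simpa using hk) (by simpa using hm) hlt (by simpa using e)
  · exact h m k (by simpa using hm) (by simpa using hk) (by omega) (by simpa using e.symm)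

-- the scatter invariant: after the whole loop, the cell addressed by s[k] holds f k
theorem pvScat_getD {a : Type} (s : List Int) (f : Nat -> a) (init : List a) (d : a)
    (hinit : init.length = s.length)
    (hrange : ∀ v ∈ s, -(s.length:Int) <= v ∧ v < (s.length:Int))
    (hnd : (s.map (fun v => pvNorm s.length v)).Nodup) :
    ∀ (m : Nat), m <= s.length -> ∀ k, k < m ->
      (pvScat s f init m).getD (pvNorm s.length (s.getD k 0)) d = f k := by
  intro m
  induction m with
  | zero => omega
  | succ m ih =>
    intro hm k hk
    have hms : m < s.length := by omega
    have hks : k < s.length := by omega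
    have hrm := hrange (s[m]) (List.getElem_mem hms)
    have hlenS : (pvScat s f init m).length = s.length := by rw [pvScat_length, hinit]
    rw [List.getD_eq_getElem s 0 hks]
    rw [pvScat_succ, PySem.List.pyGetD_natCast, List.getD_eq_getElem s 0 hms]
    rw [pvSetD_norm _ _ _ (by rw [hlenS]; exact_mod_cast hrm.1) (by rw [hlenS]; exact_mod_cast hrm.2)]
    rw [hlenS]
    by_cases hkm : k = m
    · subst hkm
      rw [List.getD_eq_getElem _ d (by rw [List.length_set, hlenS]; exact pvNorm_lt _ _ hrm.1 hrm.2)]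
      exact List.getElem_set_self _
    · rw [pvGetD_set_ne _ _ _ _ _ (pvNodup_ne s hnd m k hms hks (fun e => hkm e.symm))]
      rw [← List.getD_eq_getElem s 0 hks]
      exact ih (by omega) k (by omega)

-- a Nodup list of n valid Python indices into a length-n list addresses every cell
theorem pvSurj (s : List Int)
    (hrange : ∀ v ∈ s, -(s.length:Int) <= v ∧ v < (s.length:Int))
    (hnd : (s.map (fun v => pvNorm s.length v)).Nodup) :
    ∀ p, p < s.length -> ∃ k, k < s.length ∧ pvNorm s.length (s.getD k 0) = p := by
  intro p hp
  set M : List Nat := s.map (fun v => pvNorm s.length v) with hM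
  have hlenM : M.length = s.length := by simp [hM]
  have hsub : M.toFinset ⊆ Finset.range s.length := by
    intro x hx
    rw [List.mem_toFinset] at hx
    rw [hM, List.mem_map] at hx
    obtain ⟨v, hv, rfl⟩ := hx
    exact Finset.mem_range.mpr (pvNorm_lt _ _ (hrange v hv).1 (hrange v hv).2)
  have hcard : (Finset.range s.length).card ≤ M.toFinset.card := by
    rw [List.toFinset_card_of_nodup hnd, hlenM, Finset.card_range]
  have heq := Finset.eq_of_subset_of_card_le hsub hcard
  have hpM : p ∈ M := by
    rw [← List.mem_toFinset, heq]
    exact Finset.mem_range.mpr hp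
  obtain ⟨k, hk, hkp⟩ := List.getElem_of_mem hpM
  refine ⟨k, by omega, ?_⟩
  rw [List.getD_eq_getElem s 0 (by omega)]
  simpa [hM] using hkp

theorem pvMain (reorder_list : List Int) (n_list : List (List Int))
    (hlen : n_list.length = reorder_list.length)
    (hrange : ∀ v ∈ reorder_list, -(reorder_list.length:Int) ≤ v ∧ v < (reorder_list.length:Int))
    (hnd : (reorder_list.map (fun v => pvNorm reorder_list.length v)).Nodup) :
    swap_neighbor_index_lists reorder_list n_list = swap_neighbor_index_lists_alt reorder_list n_list := by
  unfold swap_neighbor_index_lists swap_neighbor_index_lists_alt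
  rw [if_pos hlen, if_pos hlen]
  have hB : (List.range n_list.length).foldl
      (fun new_list (k : Nat) =>
        PySem.List.pySetD new_list (PySem.List.pyGetD reorder_list (k:Int) 0)
          ((PySem.List.pyGetD n_list (k:Int) []).map (fun v => PySem.List.pyGetD reorder_list v 0)))
      (List.replicate n_list.length []) =
      pvScat reorder_list
        (fun k => (PySem.List.pyGetD n_list (k:Int) []).map (fun v => PySem.List.pyGetD reorder_list v 0))
        (List.replicate n_list.length []) n_list.length := rfl
  have hL : pvLookupBuild reorder_list =
      pvScat reorder_list (fun k => (k:Int)) (List.replicate reorder_list.length 0) reorder_list.length := rfl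
  rw [hB]
  have hlenB : (pvScat reorder_list
      (fun k => (PySem.List.pyGetD n_list (k:Int) []).map (fun v => PySem.List.pyGetD reorder_list v 0))
      (List.replicate n_list.length []) n_list.length).length = n_list.length := by
    rw [pvScat_length, List.length_replicate]
  apply List.ext_getElem (by simpa using hlenB.symm)
  intro p hp1 hp2
  rw [List.length_map, List.length_range] at hp1
  obtain ⟨k, hk, hkp⟩ := pvSurj reorder_list hrange hnd p (by omega)
  have hgetB : (pvScat reorder_list
      (fun k => (PySem.List.pyGetD n_list (k:Int) []).map (fun v => PySem.List.pyGetD reorder_list v 0))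
      (List.replicate n_list.length []) n_list.length).getD p [] =
      (PySem.List.pyGetD n_list (k:Int) []).map (fun v => PySem.List.pyGetD reorder_list v 0) := by
    rw [← hkp]
    exact pvScat_getD reorder_list _ _ [] (by simp [hlen]) hrange hnd n_list.length (by omega) k (by omega)
  have hgetL : (pvLookupBuild reorder_list).getD p 0 = (k:Int) := by
    rw [← hkp, hL]
    exact pvScat_getD reorder_list _ _ 0 (by simp) hrange hnd reorder_list.length (by omega) k (by omega)
  rw [List.getElem_map, List.getElem_range]
  rw [← List.getD_eq_getElem _ [] hp2, hgetB]
  rw [PySem.List.pyGetD_natCast, hgetL, PySem.List.pyGetD_natCast]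

-- ===== VERDICT (by name: the statement is the Claim_ definition above) =====
theorem swap_neighbor_index_lists_spec : Claim_equal_swap_neighbor_index_lists := by
  intro reorder_list n_list _hdom hpre
  obtain ⟨hlen, hrange, hnd, _hinner⟩ := hpre
  exact pvMain reorder_list n_list hlen hrange hnd
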